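-- pv_equiv track=rewrite | github.com/yngkzk/python_classwork | July-21 CW/ex6.py | get_debts
-- ===== SOURCE A (Python) =====
-- def get_debts(people):
--     debtors = 0
--     for val in people.values():
--         if val > 0:
--             debtors += 1
--         else:
--             continue
--     total_sum = sum(people.values())
--     return {'debtors': debtors, 'total': total_sum}
-- ===== SOURCE B (Python) =====
-- def get_debts(people):
--     vals = list(people.values())
--     def go(seg):
--         if not seg:
--             return (0, 0)
--         if len(seg) == 1:
--             v = seg[0]
--             return ((1 if v > 0 else 0), v)
--         mid = len(seg) // 2
--         d1, t1 = go(seg[:mid])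
--         d2, t2 = go(seg[mid:])
--         return (d1 + d2, t1 + t2)
--     d, t = go(vals)
--     return {'debtors': d, 'total': t}
-- ===== Notes on version B (the rewrite author's own statement) =====
-- stated objective: alternative
-- what changed: Replaces A's iterative counting loop plus separate sum() pass with a divide-and-conquer recursion that splits the value list in half and combines (debtors, total) pairs from the two halves.
import Mathlib
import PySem

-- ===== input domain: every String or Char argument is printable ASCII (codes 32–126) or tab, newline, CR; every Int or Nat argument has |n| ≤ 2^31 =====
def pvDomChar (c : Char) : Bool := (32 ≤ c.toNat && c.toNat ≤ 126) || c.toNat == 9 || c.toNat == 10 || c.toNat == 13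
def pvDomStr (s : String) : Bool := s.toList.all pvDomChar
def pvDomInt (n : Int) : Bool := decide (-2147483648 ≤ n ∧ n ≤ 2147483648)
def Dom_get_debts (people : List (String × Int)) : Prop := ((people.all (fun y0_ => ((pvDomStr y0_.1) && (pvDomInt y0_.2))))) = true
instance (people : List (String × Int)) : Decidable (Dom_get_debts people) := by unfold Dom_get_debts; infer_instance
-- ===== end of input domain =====

-- B replaces A's counting loop + sum() pass with a divide-and-conquer recursion over the value list; return value only.

-- ===== PORT A =====
-- loop counting debtors, then sum over values
def get_debts (people : List (String × Int)) : List (String × Int) :=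
  let debtors := people.foldl (fun acc p => if p.2 > 0 then acc + 1 else acc) (0 : Int)
  let total_sum := (people.map (·.2)).sum
  [("debtors", debtors), ("total", total_sum)]

-- ===== PORT B =====
-- divide-and-conquer: split the segment in half, combine (debtors, total) pairs
def goDebts : List Int → Int × Int
  | [] => (0, 0)
  | [v] => (if v > 0 then 1 else 0, v)
  | v :: w :: vs =>
    let seg := v :: w :: vs
    let mid := seg.length / 2
    let a := goDebts (seg.take mid)
    let b := goDebts (seg.drop mid)
    (a.1 + b.1, a.2 + b.2)
termination_by seg => seg.length
decreasing_by
  · simp [List.length_take]; omega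
  · simp; omega

def get_debts_alt (people : List (String × Int)) : List (String × Int) :=
  let dt := goDebts (people.map (·.2))
  [("debtors", dt.1), ("total", dt.2)]

-- ===== PRECONDITION & SPEC =====
def Spec_get_debts (people : List (String × Int)) (out : List (String × Int)) : Prop := out = get_debts_alt people
instance (people : List (String × Int)) (out : List (String × Int)) : Decidable (Spec_get_debts people out) := by unfold Spec_get_debts; infer_instance

-- ===== CLAIM (what is proved, stated in full; the proofs are below) =====
def Claim_equal_get_debts : Prop := ∀ (people : List (String × Int)), Dom_get_debts people → Spec_get_debts people (get_debts people)

-- ===== LEMMAS AND PROOFS =====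
-- A's left-fold count with arbitrary start d equals d plus the count from 0.
lemma foldl_count_shift (ps : List (String × Int)) (d : Int) :
    ps.foldl (fun acc p => if p.2 > 0 then acc + 1 else acc) d
      = d + ps.foldl (fun acc p => if p.2 > 0 then acc + 1 else acc) 0 := by
  induction ps generalizing d with
  | nil => simp
  | cons p ps ih =>
    by_cases h : p.2 > 0
    · simp only [List.foldl_cons, if_pos h]
      rw [ih, ih (0 + 1)]; ring
    · simp only [List.foldl_cons, if_neg h]; exact ih d

-- A's counting loop computes the number of positive values.
lemma foldl_count_eq (ps : List (String × Int)) :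
    ps.foldl (fun acc p => if p.2 > 0 then acc + 1 else acc) 0
      = ((ps.filter (fun p => p.2 > 0)).length : Int) := by
  induction ps with
  | nil => simp
  | cons p ps ih =>
    by_cases h : p.2 > 0
    · simp only [List.foldl_cons, if_pos h, foldl_count_shift, ih, List.filter_cons,
        decide_eq_true h]
      simp; ring
    · simp only [List.foldl_cons, if_neg h, ih, List.filter_cons]
      simp [h]

-- B's divide-and-conquer computes (number of positives, sum) of the segment.
lemma goDebts_eq (vals : List Int) :
    goDebts vals = (((vals.filter (fun v => v > 0)).length : Int), vals.sum) := by
  induction vals using goDebts.induct with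
  | case1 => rw [goDebts]; simp
  | case2 v => rw [goDebts]; by_cases h : v > 0 <;> simp [h]
  | case3 v w vs seg mid ih1 ih2 =>
    rw [goDebts]
    show ((goDebts ((v :: w :: vs).take ((v :: w :: vs).length / 2))).1
            + (goDebts ((v :: w :: vs).drop ((v :: w :: vs).length / 2))).1,
          (goDebts ((v :: w :: vs).take ((v :: w :: vs).length / 2))).2
            + (goDebts ((v :: w :: vs).drop ((v :: w :: vs).length / 2))).2) = _
    have ih1' : goDebts ((v :: w :: vs).take ((v :: w :: vs).length / 2))
        = (((((v :: w :: vs).take ((v :: w :: vs).length / 2)).filter (fun v => v > 0)).length : Int),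
           ((v :: w :: vs).take ((v :: w :: vs).length / 2)).sum) := ih1
    have ih2' : goDebts ((v :: w :: vs).drop ((v :: w :: vs).length / 2))
        = (((((v :: w :: vs).drop ((v :: w :: vs).length / 2)).filter (fun v => v > 0)).length : Int),
           ((v :: w :: vs).drop ((v :: w :: vs).length / 2)).sum) := ih2
    rw [ih1', ih2']
    have hsplit := List.take_append_drop ((v :: w :: vs).length / 2) (v :: w :: vs)
    refine Prod.ext ?_ ?_ <;> dsimp only
    · conv_rhs => rw [← hsplit]
      rw [List.filter_append, List.length_append]
      push_cast; ring
    · conv_rhs => rw [← hsplit]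
      rw [List.sum_append]

-- ===== VERDICT (by name: the statement is the Claim_ definition above) =====
theorem get_debts_spec : Claim_equal_get_debts := by
  intro people _
  unfold Spec_get_debts get_debts get_debts_alt
  simp only [goDebts_eq, foldl_count_eq, List.filter_map, List.length_map]
  rfl
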